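-- pv_equiv track=rewrite | github.com/deontologician/EvoFighters | EvoFighters/Creatures.py | gene_primer
-- ===== SOURCE A (Python) =====
-- def gene_primer(dna):
--     '''Breaks a dna list into chunks by the terminator -1.'''
--     chunk = []
--     for i in dna:
--         chunk.append(i)
--         if i < 0:
--             yield chunk
--             chunk = []
--     if chunk:
--         yield chunk
-- ===== SOURCE B (Python) =====
-- def gene_primer(dna):
--     '''Breaks a dna list into chunks by the terminator -1 (any negative).'''
--     dna = list(dna)
--     n = len(dna)
--     out = []
--     start = 0
--     while start < n:
--         k = next((i for i in range(start, n) if dna[i] < 0), None)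
--         if k is None:
--             out.append(dna[start:])
--             start = n
--         else:
--             out.append(dna[start:k + 1])
--             start = k + 1
--     return out
-- ===== Notes on version B (the rewrite author's own statement) =====
-- stated objective: alternative
-- what changed: B scans for the index of the next negative element and slices one chunk per cut (index-based find-cut-then-slice loop), instead of A's per-element buffer that appends each item and flushes on a negative; A is a generator while B returns the full list at once.
import Mathlib
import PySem

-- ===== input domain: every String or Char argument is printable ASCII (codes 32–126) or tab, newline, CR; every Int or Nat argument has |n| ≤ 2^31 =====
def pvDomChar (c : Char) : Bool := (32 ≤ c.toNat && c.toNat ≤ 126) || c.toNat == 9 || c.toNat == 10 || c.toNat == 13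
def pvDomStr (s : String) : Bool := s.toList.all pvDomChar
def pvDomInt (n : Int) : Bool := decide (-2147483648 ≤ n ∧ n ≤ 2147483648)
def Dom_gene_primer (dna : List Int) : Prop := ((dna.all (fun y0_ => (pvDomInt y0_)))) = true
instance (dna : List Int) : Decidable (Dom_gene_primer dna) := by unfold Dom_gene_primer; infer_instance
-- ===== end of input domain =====

-- B replaces A's per-element buffer loop by a scan-for-next-cut-then-slice loop over indices
-- (alternative decomposition, same O(n) cost); A is a Python generator, so the equivalence is
-- about the list of yielded values.

-- ===== PORT A =====
-- A: for i in dna: chunk.append(i); if i < 0: yield chunk; chunk = []  — then a trailing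
-- 'if chunk: yield chunk'.  Ported as a foldl over (yielded, chunk) plus the final flush.
def gene_primer (dna : List Int) : List (List Int) :=
  let s := dna.foldl
    (fun (s : List (List Int) × List Int) i =>
      let chunk := s.2 ++ [i]
      if i < 0 then (s.1 ++ [chunk], ([] : List Int)) else (s.1, chunk))
    ([], [])
  if s.2 = [] then s.1 else s.1 ++ [s.2]

-- ===== PORT B =====
-- B: while start < n: k = first i in range(start, n) with dna[i] < 0 (None if no such i);
-- if k is None: append dna[start:], start = n; else append dna[start:k+1], start = k+1.
-- 'next(genexpr, None)' is List.find? over range(start, n); dna[i] for i in range(start, n)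
-- is always nonnegative and in range, where PySem.List.pyGetD with default 0 is exact.
def gene_primer_alt_loop (dna : List Int) (n : Nat) (out : List (List Int)) (start : Nat) :
    List (List Int) :=
  if _h : start < n then
    match hf : (PySem.List.pyRange (start : Int) (n : Int)).find?
        (fun i => decide (PySem.List.pyGetD dna i 0 < 0)) with
    | none => gene_primer_alt_loop dna n (out ++ [PySem.List.slice dna (some (start : Int)) none]) n
    | some k =>
        gene_primer_alt_loop dna n
          (out ++ [PySem.List.slice dna (some (start : Int)) (some (k + 1))]) (k + 1).toNat
  else out
termination_by n - start
decreasing_by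
  · omega
  · have hk := PySem.List.mem_pyRange_one.mp (List.mem_of_find?_eq_some hf)
    omega

def gene_primer_alt (dna : List Int) : List (List Int) :=
  gene_primer_alt_loop dna dna.length [] 0

-- ===== PRECONDITION & SPEC =====
def Spec_gene_primer (dna : List Int) (out : List (List Int)) : Prop := out = gene_primer_alt dna
instance (dna : List Int) (out : List (List Int)) : Decidable (Spec_gene_primer dna out) := by unfold Spec_gene_primer; infer_instance

-- ===== CLAIM (what is proved, stated in full; the proofs are below) =====
def Claim_equal_gene_primer : Prop := ∀ (dna : List Int), Dom_gene_primer dna → Spec_gene_primer dna (gene_primer dna)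

-- ===== LEMMAS AND PROOFS =====

-- Reference chunker: A's loop written as structural recursion on the remaining input.
def pvGo (cur : List Int) : List Int → List (List Int)
  | [] => if cur = [] then [] else [cur]
  | i :: rest => if i < 0 then (cur ++ [i]) :: pvGo [] rest else pvGo (cur ++ [i]) rest

theorem gene_primer_eq_pvGo (xs : List Int) :
    ∀ (acc : List (List Int)) (cur : List Int),
      (let s := xs.foldl
        (fun (s : List (List Int) × List Int) i =>
          let chunk := s.2 ++ [i]
          if i < 0 then (s.1 ++ [chunk], ([] : List Int)) else (s.1, chunk))
        (acc, cur);
       if s.2 = [] then s.1 else s.1 ++ [s.2]) = acc ++ pvGo cur xs := by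
  induction xs with
  | nil =>
    intro acc cur
    simp only [List.foldl_nil, pvGo]
    split_ifs <;> simp_all
  | cons i rest ih =>
    intro acc cur
    simp only [List.foldl_cons, pvGo]
    by_cases hi : i < 0
    · simp only [hi, if_pos]
      rw [ih]
      simp
    · simp only [hi, if_neg, not_false_iff]
      rw [ih]

theorem pvGo_none (xs : List Int) :
    ∀ cur : List Int, xs.findIdx? (fun y => decide (y < 0)) = none →
      pvGo cur xs = if cur ++ xs = [] then [] else [cur ++ xs] := by
  induction xs with
  | nil => intro cur _; simp [pvGo]
  | cons i rest ih =>
    intro cur h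
    rw [List.findIdx?_cons] at h
    by_cases hi : i < 0
    · simp [hi] at h
    · simp only [hi, decide_false, if_false, Bool.false_eq_true] at h
      simp only [Option.map_eq_none_iff] at h
      simp only [pvGo, hi, if_neg, not_false_iff]
      rw [ih _ h]
      simp

theorem pvGo_some (xs : List Int) :
    ∀ (cur : List Int) (k : Nat), xs.findIdx? (fun y => decide (y < 0)) = some k →
      pvGo cur xs = (cur ++ xs.take (k + 1)) :: pvGo [] (xs.drop (k + 1)) := by
  induction xs with
  | nil => intro cur k h; simp at h
  | cons i rest ih =>
    intro cur k h
    rw [List.findIdx?_cons] at h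
    by_cases hi : i < 0
    · simp only [hi, decide_true, if_true, Option.some.injEq] at h
      subst h
      simp [pvGo, hi]
    · simp only [hi, decide_false, if_false, Bool.false_eq_true] at h
      obtain ⟨k', hk', rfl⟩ := Option.map_eq_some_iff.mp h
      simp only [pvGo, hi, if_neg, not_false_iff]
      rw [ih _ _ hk']
      simp

-- The index scan of B over range(start, n) is findIdx? on the suffix, shifted by start.
theorem pv_find_range (dna : List Int) :
    ∀ (m start : Nat), dna.length - start ≤ m →
      (PySem.List.pyRange (start : Int) (dna.length : Int)).find?
          (fun i => decide (PySem.List.pyGetD dna i 0 < 0)) =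
        ((dna.drop start).findIdx? (fun y => decide (y < 0))).map
          (fun j : Nat => ((start + j : Nat) : Int)) := by
  intro m
  induction m with
  | zero =>
    intro start hle
    have hge : dna.length ≤ start := by omega
    rw [PySem.List.pyRange_one_eq_nil (by exact_mod_cast hge),
        List.drop_eq_nil_of_le hge]
    simp
  | succ m ih =>
    intro start hle
    by_cases hlt : start < dna.length
    · rw [PySem.List.pyRange_one_cons (by exact_mod_cast hlt), List.find?_cons,
          List.drop_eq_getElem_cons hlt, List.findIdx?_cons]
      simp only [PySem.List.pyGetD_natCast, List.getD_eq_getElem?_getD,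
        List.getElem?_eq_getElem hlt, Option.getD_some]
      by_cases hneg : dna[start] < 0
      · simp [hneg]
      · simp only [hneg, decide_false, if_false, Bool.false_eq_true]
        have : ((start : Int) + 1) = ((start + 1 : Nat) : Int) := by push_cast; ring
        rw [this, ih (start + 1) (by omega)]
        cases hfi : (dna.drop (start + 1)).findIdx? (fun y => decide (y < 0)) with
        | none => simp
        | some j =>
          simp only [Option.map_some, Option.some.injEq]
          push_cast
          ring
    · have hge : dna.length ≤ start := by omega
      rw [PySem.List.pyRange_one_eq_nil (by exact_mod_cast hge),
          List.drop_eq_nil_of_le hge]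
      simp

theorem gene_primer_alt_loop_eq (dna : List Int) :
    ∀ (m start : Nat) (out : List (List Int)), dna.length - start ≤ m →
      gene_primer_alt_loop dna dna.length out start = out ++ pvGo [] (dna.drop start) := by
  intro m
  induction m with
  | zero =>
    intro start out hle
    have hge : dna.length ≤ start := by omega
    rw [gene_primer_alt_loop, dif_neg (by omega), List.drop_eq_nil_of_le hge]
    simp [pvGo]
  | succ m ih =>
    intro start out hle
    by_cases hlt : start < dna.length
    · rw [gene_primer_alt_loop, dif_pos hlt]
      split
      · rename_i hf
        rw [pv_find_range dna (dna.length - start) start (by omega)] at hf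
        have hnone : (dna.drop start).findIdx? (fun y => decide (y < 0)) = none := by
          cases h' : (dna.drop start).findIdx? (fun y => decide (y < 0)) with
          | none => rfl
          | some j => rw [h'] at hf; simp at hf
        rw [ih dna.length _ (by omega), pvGo_none _ _ hnone]
        have hne : dna.drop start ≠ [] := by
          intro h0
          have := List.drop_eq_nil_iff.mp h0
          omega
        rw [List.drop_eq_nil_of_le (le_refl _)]
        simp [pvGo, PySem.List.slice_from_natCast, hne]
      · rename_i k hf
        rw [pv_find_range dna (dna.length - start) start (by omega)] at hf
        cases hj : (dna.drop start).findIdx? (fun y => decide (y < 0)) with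
        | none => rw [hj] at hf; simp at hf
        | some j =>
        rw [hj] at hf
        simp only [Option.map_some, Option.some.injEq] at hf
        have hk : (((start + j : Nat)) : Int) = k := hf
        have hjlt : j < (dna.drop start).length :=
          (List.findIdx?_eq_some_iff_findIdx_eq.mp hj).1
        have hjlen : j < dna.length - start := by simpa using hjlt
        have hk1 : (k + 1) = (((start + j + 1 : Nat)) : Int) := by omega
        have hkt : (k + 1).toNat = start + j + 1 := by omega
        rw [hkt, ih (start + j + 1) _ (by omega), pvGo_some _ _ j hj]
        rw [hk1, PySem.List.slice_natCast]
        have htk : start + j + 1 - start = j + 1 := by omega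
        have hdd : dna.drop (start + j + 1) = (dna.drop start).drop (j + 1) := by
          rw [List.drop_drop, Nat.add_assoc]
        rw [htk, hdd]
        simp
    · rw [gene_primer_alt_loop, dif_neg (by omega),
          List.drop_eq_nil_of_le (by omega : dna.length ≤ start)]
      simp [pvGo]

-- ===== VERDICT (by name: the statement is the Claim_ definition above) =====
theorem gene_primer_spec : Claim_equal_gene_primer := by
  intro dna _
  unfold Spec_gene_primer gene_primer gene_primer_alt
  rw [gene_primer_alt_loop_eq dna dna.length 0 [] (by omega)]
  simpa using gene_primer_eq_pvGo dna [] []
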